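-- pv_equiv track=rewrite | github.com/hy2jin/TIL | ALGORITHM/programmers/23년4월/귤고르기.py | solution
-- ===== SOURCE A (Python) =====
-- from collections import OrderedDict
--
-- def solution(k, tangerine):
--     dic = {}
--     for t in tangerine:
--         try: dic[t] += 1
--         except: dic[t] = 1
--     oDic = OrderedDict(sorted(dic.items(), key=lambda x:x[1], reverse=True))
--     kList = list(oDic)
--
--     for i in range(len(kList)):
--         k -= dic[kList[i]]
--         if k <= 0:
--             return i + 1
-- ===== SOURCE B (Python) =====
-- def solution(k, tangerine):
--     freq = {}
--     for t in tangerine: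
--         freq[t] = freq.get(t, 0) + 1
--     maxc = max(freq.values(), default=0)
--     buckets = {}
--     for size, c in freq.items():
--         buckets.setdefault(c, []).append(size)
--     taken = 0
--     for c in range(maxc, 0, -1):
--         for _size in buckets.get(c, []):
--             k -= c
--             taken += 1
--             if k <= 0:
--                 return taken
-- ===== Notes on version B (the rewrite author's own statement) =====
-- stated objective: faster
-- what changed: B replaces A's comparison sort of the frequency-dict items with a counting-sort style pass: it buckets the distinct sizes by their frequency and walks the count values from the maximum down, so no comparison sort is performed.
-- outside the precondition, e.g. on solution(5, []): A returns None, B returns None; on solution(4, [1, 1, 2]): A returns None, B returns None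
import Mathlib
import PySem

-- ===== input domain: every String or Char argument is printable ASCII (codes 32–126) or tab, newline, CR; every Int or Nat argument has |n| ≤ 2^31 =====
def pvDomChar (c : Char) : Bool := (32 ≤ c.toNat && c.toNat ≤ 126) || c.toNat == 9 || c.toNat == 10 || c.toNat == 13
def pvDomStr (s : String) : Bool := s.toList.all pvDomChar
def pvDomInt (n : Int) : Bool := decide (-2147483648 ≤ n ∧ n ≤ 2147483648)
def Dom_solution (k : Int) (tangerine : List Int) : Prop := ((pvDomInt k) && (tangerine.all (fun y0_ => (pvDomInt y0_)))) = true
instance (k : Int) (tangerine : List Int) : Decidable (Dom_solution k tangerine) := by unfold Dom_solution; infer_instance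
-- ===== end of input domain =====

-- B buckets the distinct tangerine sizes by their frequency and walks the count values downward
-- instead of comparison-sorting the frequency dict items as A does (measured faster in a timing run).
-- Both Pythons fall through returning None when k exceeds the basket size; Pre_ excludes those inputs.

-- ===== PORT A =====
-- A's loop 'for i in range(len(kList)): k -= dic[kList[i]]; if k <= 0: return i + 1'
-- (structural recursion over kList carrying the index; the fall-through, excluded by Pre_, yields 0)
def solutionLoopA (dic : PySem.Dict Int Int) (keys : List Int) (k : Int) (i : Int) : Int :=
  match keys with
  | [] => 0
  | key :: rest =>
    let k' := k - dic.getD key 0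
    if k' ≤ 0 then i + 1 else solutionLoopA dic rest k' (i + 1)

def solution (k : Int) (tangerine : List Int) : Int :=
  let dic := tangerine.foldl (fun d t => d.modify t 0 (· + 1)) PySem.Dict.empty
  let oDic := PySem.List.sorted dic.items (fun p => p.2) true
  let kList := oDic.map (fun p => p.1)
  solutionLoopA dic kList k 0

-- ===== PORT B =====
-- B's inner loop over one bucket: returns .inl answer on early return, else the updated (k, taken)
def solutionInnerB (c : Int) (sizes : List Int) (k : Int) (taken : Int) : Int ⊕ (Int × Int) :=
  match sizes with
  | [] => Sum.inr (k, taken)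
  | _ :: rest =>
    let k' := k - c
    let taken' := taken + 1
    if k' ≤ 0 then Sum.inl taken' else solutionInnerB c rest k' taken'

-- B's outer loop 'for c in range(maxc, 0, -1)'; fall-through (excluded by Pre_) yields 0
def solutionOuterB (buckets : PySem.Dict Int (List Int)) (cs : List Int) (k : Int) (taken : Int) : Int :=
  match cs with
  | [] => 0
  | c :: rest =>
    match solutionInnerB c (buckets.getD c []) k taken with
    | Sum.inl ans => ans
    | Sum.inr (k', taken') => solutionOuterB buckets rest k' taken'

def solution_alt (k : Int) (tangerine : List Int) : Int :=
  let freq := tangerine.foldl (fun d t => d.insert t (d.getD t 0 + 1)) PySem.Dict.empty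
  let maxc := PySem.List.maxD freq.values (fun v => v) 0
  let buckets := freq.items.foldl (fun b p => b.modify p.2 [] (· ++ [p.1])) PySem.Dict.empty
  solutionOuterB buckets (PySem.List.pyRange maxc 0 (-1)) k 0

-- ===== PRECONDITION & SPEC =====
-- Pre_ excludes exactly the inputs (empty basket, or k larger than the basket) on which Python A
-- falls off the loop and returns None, which is not a value of the declared Int type.
def Pre_solution (k : Int) (tangerine : List Int) : Prop :=
  tangerine ≠ [] ∧ k ≤ (tangerine.length : Int)
instance (k : Int) (tangerine : List Int) : Decidable (Pre_solution k tangerine) := by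
  unfold Pre_solution; infer_instance

def pvWitness_solution : Int × List Int := (2, [1, 2, 2])

def Spec_solution (k : Int) (tangerine : List Int) (out : Int) : Prop := out = solution_alt k tangerine
instance (k : Int) (tangerine : List Int) (out : Int) : Decidable (Spec_solution k tangerine out) := by unfold Spec_solution; infer_instance

-- ===== CLAIM (what is proved, stated in full; the proofs are below) =====
def Claim_equal_solution : Prop := ∀ (k : Int) (tangerine : List Int), Dom_solution k tangerine → Pre_solution k tangerine → Spec_solution k tangerine (solution k tangerine)

-- ===== LEMMAS AND PROOFS =====

-- The common abstraction: scan a list of counts, subtracting each from k; return the running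
-- position when k drops to 0 or below, and 0 on fall-through.
def pvScan (k : Int) (cs : List Int) (i : Int) : Int :=
  match cs with
  | [] => 0
  | c :: rest => if k - c ≤ 0 then i + 1 else pvScan (k - c) rest (i + 1)

theorem pvLoopA_eq_scan (dic : PySem.Dict Int Int) (keys : List Int) (k i : Int) :
    solutionLoopA dic keys k i = pvScan k (keys.map (fun key => dic.getD key 0)) i := by
  induction keys generalizing k i with
  | nil => rfl
  | cons key rest ih => simp [solutionLoopA, pvScan, ih]

theorem pvInnerB_scan (c : Int) (sizes : List Int) (k taken : Int) (rest : List Int) :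
    pvScan k (List.replicate sizes.length c ++ rest) taken =
      (match solutionInnerB c sizes k taken with
       | Sum.inl ans => ans
       | Sum.inr (k', taken') => pvScan k' rest taken') := by
  induction sizes generalizing k taken with
  | nil => rfl
  | cons _ t ih =>
    simp only [List.length_cons, List.replicate_succ, List.cons_append, pvScan, solutionInnerB]
    split_ifs with h
    · rfl
    · exact ih (k - c) (taken + 1)

theorem pvOuterB_scan (buckets : PySem.Dict Int (List Int)) (cs : List Int) (k taken : Int) :
    solutionOuterB buckets cs k taken =
      pvScan k (cs.flatMap (fun c => List.replicate (buckets.getD c []).length c)) taken := by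
  induction cs generalizing k taken with
  | nil => rfl
  | cons c rest ih =>
    simp only [List.flatMap_cons, solutionOuterB]
    rw [pvInnerB_scan c (buckets.getD c []) k taken]
    cases h : solutionInnerB c (buckets.getD c []) k taken with
    | inl ans => rfl
    | inr p => cases p with | mk k' taken' => simp [ih]

-- a list whose elements all equal c is a replicate
theorem pvMapSndFilter (items : List (Int × Int)) (c : Int) :
    (items.filter (fun p => p.2 == c)).map (fun p => p.2) =
      List.replicate (items.filter (fun p => p.2 == c)).length c := by
  rw [List.eq_replicate_iff]
  constructor
  · simp
  · intro b hb
    simp only [List.mem_map, List.mem_filter, beq_iff_eq] at hb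
    obtain ⟨p, ⟨_, hc⟩, rfl⟩ := hb
    exact hc

-- bucketing by a nodup covering list of keys is a permutation of the original list
theorem pvFlatMapFilterPerm (cs : List Int) (l : List (Int × Int)) (hnd : cs.Nodup)
    (hcov : ∀ p ∈ l, p.2 ∈ cs) :
    (cs.flatMap (fun c => l.filter (fun p => p.2 == c))).Perm l := by
  induction cs generalizing l with
  | nil =>
    cases l with
    | nil => simp
    | cons p t => exact absurd (hcov p (by simp)) (by simp)
  | cons c rest ih =>
    simp only [List.flatMap_cons]
    have hstep : rest.flatMap (fun c' => l.filter (fun p => p.2 == c')) =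
        rest.flatMap (fun c' => (l.filter (fun p => !(p.2 == c))).filter (fun p => p.2 == c')) := by
      apply List.flatMap_congr
      intro c' hc'
      have hne : c' ≠ c := by
        rintro rfl
        exact (List.nodup_cons.mp hnd).1 hc'
      rw [List.filter_filter]
      apply List.filter_congr
      intro p _
      by_cases hp : p.2 = c'
      · simp [hp, hne]
      · simp [hp]
    rw [hstep]
    have hIH : (rest.flatMap (fun c' =>
        (l.filter (fun p => !(p.2 == c))).filter (fun p => p.2 == c'))).Perm
        (l.filter (fun p => !(p.2 == c))) := by
      apply ih
      · exact (List.nodup_cons.mp hnd).2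
      · intro p hp
        have hmem := List.mem_of_mem_filter hp
        have hne : ¬(p.2 == c) = true := by
          have := List.of_mem_filter hp
          simpa using this
        have := hcov p hmem
        simp only [List.mem_cons] at this
        rcases this with h | h
        · exact absurd (by simpa using h) (by simpa using hne)
        · exact h
    exact (hIH.append_left _).trans (List.filter_append_perm _ l)

-- blocks of equal values listed in non-increasing block order are pairwise non-increasing
theorem pvPairwiseFlat (cs : List Int) (n : Int → Nat)
    (h : cs.Pairwise (fun a b => b ≤ a)) :
    (cs.flatMap (fun c => List.replicate (n c) c)).Pairwise (fun a b => b ≤ a) := by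
  induction cs with
  | nil => simp
  | cons c rest ih =>
    simp only [List.flatMap_cons]
    rw [List.pairwise_append]
    refine ⟨?_, ih (List.Pairwise.of_cons h), ?_⟩
    · exact List.pairwise_replicate.mpr (Or.inr (le_refl c))
    · intro a ha b hb
      obtain rfl := List.eq_of_mem_replicate ha
      simp only [List.mem_flatMap] at hb
      obtain ⟨c', hc', hb⟩ := hb
      obtain rfl := List.eq_of_mem_replicate hb
      exact List.rel_of_pairwise_cons h hc'

theorem pvMain (k : Int) (tangerine : List Int) : solution k tangerine = solution_alt k tangerine := by
  have hdic : tangerine.foldl (fun d t => d.modify t 0 (· + 1)) PySem.Dict.empty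
      = PySem.Dict.counter tangerine := (PySem.Dict.counter_eq_foldl tangerine).symm
  have hfreq : tangerine.foldl (fun d t => d.insert t (d.getD t 0 + 1)) PySem.Dict.empty
      = PySem.Dict.counter tangerine := PySem.Dict.foldl_insert_getD_add_one_eq_counter tangerine
  simp only [solution, solution_alt, hdic, hfreq]
  set C := PySem.Dict.counter tangerine with hC
  set items := C.items with hitems
  set maxc := PySem.List.maxD C.values (fun v => v) 0 with hmaxc
  set cs := PySem.List.pyRange maxc 0 (-1) with hcs
  set B := items.foldl (fun b p => b.modify p.2 [] (· ++ [p.1])) PySem.Dict.empty with hB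
  -- left side: A's loop is a scan of the sorted items' counts
  rw [pvLoopA_eq_scan, List.map_map]
  have hlook : (PySem.List.sorted items (fun p => p.2) true).map
        ((fun key => C.getD key 0) ∘ (fun p => p.1))
      = (PySem.List.sorted items (fun p => p.2) true).map (fun p => p.2) := by
    apply List.map_congr_left
    intro p hp
    have hpmem : p ∈ items := (PySem.List.sorted_perm items (fun p => p.2) true).mem_iff.mp hp
    rw [hitems, hC, PySem.Dict.items_counter] at hpmem
    simp only [List.mem_map] at hpmem
    obtain ⟨s, _, rfl⟩ := hpmem
    show C.getD s 0 = ((s, (List.count s tangerine : Int))).2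
    rw [hC]
    exact PySem.Dict.getD_counter tangerine s
  rw [hlook]
  -- right side: B's nested loops are a scan of the bucketed counts
  rw [pvOuterB_scan]
  have hbucket : ∀ c : Int, B.getD c [] = (items.filter (fun p => p.2 == c)).map (fun p => p.1) := by
    intro c
    have h1 : B = (items.map (fun p => (p.2, p.1))).foldl
        (fun b q => b.modify q.1 [] (· ++ [q.2])) PySem.Dict.empty := by
      rw [hB, List.foldl_map]
    rw [h1, PySem.Dict.getD_foldl_modify_append]
    simp [List.filter_map, Function.comp_def, List.map_map]
  have hflat : cs.flatMap (fun c => List.replicate (B.getD c []).length c)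
      = cs.flatMap (fun c => List.replicate (items.filter (fun p => p.2 == c)).length c) := by
    apply List.flatMap_congr
    intro c _
    rw [hbucket c, List.length_map]
  rw [hflat]
  -- it remains to show the two count lists are equal
  congr 1
  have hcov : ∀ p ∈ items, p.2 ∈ cs := by
    intro p hp
    have hval : p.2 ∈ C.values := by
      have : C.values = items.map (fun q => q.2) := rfl
      rw [this]
      exact List.mem_map.mpr ⟨p, hp, rfl⟩
    have hle : p.2 ≤ maxc := PySem.List.le_maxD_id C.values 0 p.2 hval
    have hpos : 0 < p.2 := by
      rw [hitems, hC, PySem.Dict.items_counter] at hp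
      simp only [List.mem_map] at hp
      obtain ⟨s, hs, rfl⟩ := hp
      have hsmem : s ∈ tangerine := (PySem.Set.mem_ofList tangerine s).mp hs
      show (0 : Int) < (List.count s tangerine : Int)
      exact_mod_cast List.count_pos_iff.mpr hsmem
    rw [hcs, PySem.List.mem_pyRange_neg_one]
    exact ⟨hpos, hle⟩
  have hnd : cs.Nodup := by
    rw [hcs, PySem.List.pyRange_neg_one_eq_reverse]
    exact List.nodup_reverse.mpr (PySem.List.nodup_pyRange_one _ _)
  have hB_eq : cs.flatMap (fun c => List.replicate (items.filter (fun p => p.2 == c)).length c)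
      = (cs.flatMap (fun c => items.filter (fun p => p.2 == c))).map (fun p => p.2) := by
    rw [List.map_flatMap]
    exact (List.flatMap_congr (fun c _ => pvMapSndFilter items c)).symm
  have hperm : ((PySem.List.sorted items (fun p => p.2) true).map (fun p => p.2)).Perm
      (cs.flatMap (fun c => List.replicate (items.filter (fun p => p.2 == c)).length c)) := by
    rw [hB_eq]
    exact ((PySem.List.sorted_perm items (fun p => p.2) true).map (fun p => p.2)).trans
      ((pvFlatMapFilterPerm cs items hnd hcov).map (fun p => p.2)).symm
  have hpwA : ((PySem.List.sorted items (fun p => p.2) true).map (fun p => p.2)).Pairwise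
      (fun a b => b ≤ a) :=
    List.pairwise_map.mpr (PySem.List.sorted_pairwise_rev items (fun p => p.2))
  have hcs_pw : cs.Pairwise (fun a b : Int => b ≤ a) := by
    rw [hcs, PySem.List.pyRange_neg_one_eq_reverse]
    rw [List.pairwise_reverse]
    exact (PySem.List.pairwise_lt_pyRange_one _ _).imp (fun h => le_of_lt h)
  have hpwB := pvPairwiseFlat cs (fun c => (items.filter (fun p => p.2 == c)).length) hcs_pw
  exact List.Perm.eq_of_pairwise (fun a b _ _ h1 h2 => le_antisymm h2 h1) hpwA hpwB hperm

-- ===== VERDICT (by name: the statement is the Claim_ definition above) =====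
theorem solution_spec : Claim_equal_solution := by
  intro k tangerine _ _
  unfold Spec_solution
  exact pvMain k tangerine
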